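-- pv_equiv track=rewrite | github.com/kaleidoscopeAI/goeckoh-site | GOECKOH/goeckoh/psychoacoustic_engine/vocoder_stub.py | g2p
-- ===== SOURCE A (Python) =====
-- from typing import List, Protocol
--
-- def g2p(text: str) -> List[str]:
--     """Real grapheme-to-phoneme conversion using CMU dictionary approach"""
--     text = text.upper().strip()
--     if not text:
--         return []
--
--     # Simplified English phoneme mapping
--     phoneme_map = {
--         'A': ['AE'], 'B': ['B'], 'C': ['K'], 'D': ['D'], 'E': ['IY'],
--         'F': ['F'], 'G': ['G'], 'H': ['HH'], 'I': ['IH'], 'J': ['JH'],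
--         'K': ['K'], 'L': ['L'], 'M': ['M'], 'N': ['N'], 'O': ['OW'],
--         'P': ['P'], 'Q': ['K', 'W'], 'R': ['R'], 'S': ['S'], 'T': ['T'],
--         'U': ['UW'], 'V': ['V'], 'W': ['W'], 'X': ['K', 'S'], 'Y': ['Y'],
--         'Z': ['Z']
--     }
--
--     # Handle common vowel combinations
--     vowel_combinations = {
--         'AI': ['EY'], 'AY': ['EY'], 'EE': ['IY'], 'EA': ['IY'],
--         'OO': ['UW'], 'OU': ['AW'], 'OW': ['OW'], 'OI': ['OY'],
--         'TH': ['TH'], 'SH': ['SH'], 'CH': ['CH'], 'NG': ['NG']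
--     }
--
--     phonemes: List[str] = []
--     i = 0
--     while i < len(text):
--         # Check for two-letter combinations first
--         if i < len(text) - 1:
--             combo = text[i:i+2]
--             if combo in vowel_combinations:
--                 phonemes.extend(vowel_combinations[combo])
--                 i += 2
--                 continue
--
--         # Single letter mapping
--         char = text[i]
--         if char in phoneme_map:
--             phonemes.extend(phoneme_map[char])
--         elif char in 'AEIOU':
--             # Vowel fallback
--             phonemes.append(char)
--         # Skip spaces and punctuation
--         i += 1
--
--     return phonemes
-- ===== SOURCE B (Python) =====
-- from typing import List
--
-- _DIGRAPHS = {
--     'AI': ['EY'], 'AY': ['EY'], 'EE': ['IY'], 'EA': ['IY'],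
--     'OO': ['UW'], 'OU': ['AW'], 'OW': ['OW'], 'OI': ['OY'],
--     'TH': ['TH'], 'SH': ['SH'], 'CH': ['CH'], 'NG': ['NG'],
-- }
-- _SINGLES = {
--     'A': ['AE'], 'B': ['B'], 'C': ['K'], 'D': ['D'], 'E': ['IY'],
--     'F': ['F'], 'G': ['G'], 'H': ['HH'], 'I': ['IH'], 'J': ['JH'],
--     'K': ['K'], 'L': ['L'], 'M': ['M'], 'N': ['N'], 'O': ['OW'],
--     'P': ['P'], 'Q': ['K', 'W'], 'R': ['R'], 'S': ['S'], 'T': ['T'],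
--     'U': ['UW'], 'V': ['V'], 'W': ['W'], 'X': ['K', 'S'], 'Y': ['Y'],
--     'Z': ['Z'],
-- }
-- _MAP = {**_DIGRAPHS, **_SINGLES}
--
-- def g2p(text: str) -> List[str]:
--     out: List[str] = []
--     pend = ''  # last char not yet emitted; '' after a digraph was consumed
--     for ch in text.upper().strip():
--         if pend + ch in _DIGRAPHS:
--             out += _DIGRAPHS[pend + ch]
--             pend = ''
--         else:
--             out += _MAP.get(pend, [])
--             pend = ch
--     out += _MAP.get(pend, [])
--     return out
-- ===== Notes on version B (the rewrite author's own statement) =====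
-- stated objective: simpler
-- what changed: Replaces A's index-arithmetic while loop with three-way branching (digraph dict, single-letter dict, dead vowel fallback) by a one-pass pending-character automaton: a for-loop over the characters that keeps the last unconsumed char, emits a digraph's phonemes when pending+char is a digraph, and otherwise flushes the pending char through a single merged digraph+letter map with a [] default.
import Mathlib
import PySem

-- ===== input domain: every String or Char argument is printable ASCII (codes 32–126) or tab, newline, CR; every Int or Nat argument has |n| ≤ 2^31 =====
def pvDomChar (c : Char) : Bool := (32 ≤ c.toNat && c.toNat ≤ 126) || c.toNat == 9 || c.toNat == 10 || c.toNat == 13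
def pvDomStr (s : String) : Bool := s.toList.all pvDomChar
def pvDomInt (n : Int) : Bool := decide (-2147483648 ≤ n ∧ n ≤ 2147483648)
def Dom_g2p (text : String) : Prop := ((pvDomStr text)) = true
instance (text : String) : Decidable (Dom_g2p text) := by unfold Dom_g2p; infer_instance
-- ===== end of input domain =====

-- B replaces A's index-juggling loop (digraph dict + letter dict + dead vowel fallback) by a one-pass pending-char automaton over one merged map (simpler; same cost).

-- ===== PORT A =====
def phonemeMapA : PySem.Dict (List Char) (List String) := PySem.Dict.mk
  [(['A'], ["AE"]), (['B'], ["B"]), (['C'], ["K"]), (['D'], ["D"]), (['E'], ["IY"]),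
   (['F'], ["F"]), (['G'], ["G"]), (['H'], ["HH"]), (['I'], ["IH"]), (['J'], ["JH"]),
   (['K'], ["K"]), (['L'], ["L"]), (['M'], ["M"]), (['N'], ["N"]), (['O'], ["OW"]),
   (['P'], ["P"]), (['Q'], ["K", "W"]), (['R'], ["R"]), (['S'], ["S"]), (['T'], ["T"]),
   (['U'], ["UW"]), (['V'], ["V"]), (['W'], ["W"]), (['X'], ["K", "S"]), (['Y'], ["Y"]),
   (['Z'], ["Z"])]

def vowelCombosA : PySem.Dict (List Char) (List String) := PySem.Dict.mk
  [(['A','I'], ["EY"]), (['A','Y'], ["EY"]), (['E','E'], ["IY"]), (['E','A'], ["IY"]),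
   (['O','O'], ["UW"]), (['O','U'], ["AW"]), (['O','W'], ["OW"]), (['O','I'], ["OY"]),
   (['T','H'], ["TH"]), (['S','H'], ["SH"]), (['C','H'], ["CH"]), (['N','G'], ["NG"])]

-- the while loop of A, recursing on the index i
def g2pLoopA (t : List Char) (i : Nat) : List String :=
  if h : i < t.length then
    -- two-letter combination check, only when i < len(text) - 1
    match (if i < t.length - 1 then
             vowelCombosA.get? (PySem.List.slice t (some (i : Int)) (some ((i : Int) + 2)))
           else none) with
    | some ps => ps ++ g2pLoopA t (i + 2)
    | none =>
      (match phonemeMapA.get? [t[i]] with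
       | some ps => ps
       | none =>
         if PySem.Chars.isIn [t[i]] ['A','E','I','O','U'] then [String.mk [t[i]]] else []) ++
      g2pLoopA t (i + 1)
  else []
termination_by t.length - i
decreasing_by all_goals omega

def g2p (text : String) : List String :=
  let t := PySem.Chars.strip (PySem.Chars.upper text.toList)
  if t.isEmpty then [] else g2pLoopA t 0

-- ===== PORT B =====
def g2pDigraphPairsB : List (List Char × List String) :=
  [(['A','I'], ["EY"]), (['A','Y'], ["EY"]), (['E','E'], ["IY"]), (['E','A'], ["IY"]),
   (['O','O'], ["UW"]), (['O','U'], ["AW"]), (['O','W'], ["OW"]), (['O','I'], ["OY"]),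
   (['T','H'], ["TH"]), (['S','H'], ["SH"]), (['C','H'], ["CH"]), (['N','G'], ["NG"])]

def g2pSinglePairsB : List (List Char × List String) :=
  [(['A'], ["AE"]), (['B'], ["B"]), (['C'], ["K"]), (['D'], ["D"]), (['E'], ["IY"]),
   (['F'], ["F"]), (['G'], ["G"]), (['H'], ["HH"]), (['I'], ["IH"]), (['J'], ["JH"]),
   (['K'], ["K"]), (['L'], ["L"]), (['M'], ["M"]), (['N'], ["N"]), (['O'], ["OW"]),
   (['P'], ["P"]), (['Q'], ["K", "W"]), (['R'], ["R"]), (['S'], ["S"]), (['T'], ["T"]),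
   (['U'], ["UW"]), (['V'], ["V"]), (['W'], ["W"]), (['X'], ["K", "S"]), (['Y'], ["Y"]),
   (['Z'], ["Z"])]

def g2pDigraphsB : PySem.Dict (List Char) (List String) := PySem.Dict.mk g2pDigraphPairsB

-- {**_DIGRAPHS, **_SINGLES}: keys are disjoint (2-char vs 1-char), so the merge is concatenation
def g2pMapB : PySem.Dict (List Char) (List String) :=
  PySem.Dict.mk (g2pDigraphPairsB ++ g2pSinglePairsB)

-- one loop step: pend is the not-yet-emitted char ([] after a digraph was consumed)
def g2pStepB (acc : List String × List Char) (ch : Char) : List String × List Char :=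
  if g2pDigraphsB.contains (acc.2 ++ [ch]) then
    (acc.1 ++ g2pDigraphsB.getD (acc.2 ++ [ch]) [], [])
  else
    (acc.1 ++ g2pMapB.getD acc.2 [], [ch])

def g2p_alt (text : String) : List String :=
  let acc := (PySem.Chars.strip (PySem.Chars.upper text.toList)).foldl g2pStepB ([], [])
  acc.1 ++ g2pMapB.getD acc.2 []

-- ===== PRECONDITION & SPEC =====
def Spec_g2p (text : String) (out : List String) : Prop := out = g2p_alt text
instance (text : String) (out : List String) : Decidable (Spec_g2p text out) := by unfold Spec_g2p; infer_instance

-- ===== CLAIM (what is proved, stated in full; the proofs are below) =====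
def Claim_equal_g2p : Prop := ∀ (text : String), Dom_g2p text → Spec_g2p text (g2p text)

-- ===== LEMMAS AND PROOFS =====

-- flushing the automaton state: the tail of g2p_alt, named for the proofs
def flushB (acc : List String × List Char) : List String :=
  acc.1 ++ g2pMapB.getD acc.2 []

lemma single_align (c : Char) :
    g2pMapB.getD [c] [] =
      (match phonemeMapA.get? [c] with
       | some ps => ps
       | none =>
         if PySem.Chars.isIn [c] ['A','E','I','O','U'] then [String.mk [c]] else []) := by
  have hget : g2pMapB.get? [c] = phonemeMapA.get? [c] := by
    simp [g2pMapB, g2pDigraphPairsB, g2pSinglePairsB, phonemeMapA, PySem.Dict.get?_mk_cons]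
  rcases h : phonemeMapA.get? [c] with _ | ps
  · have hvow : PySem.Chars.isIn [c] ['A','E','I','O','U'] = false := by
      by_contra hne
      have htrue : PySem.Chars.isIn [c] ['A','E','I','O','U'] = true := by
        cases hx : PySem.Chars.isIn [c] ['A','E','I','O','U'] <;> simp_all
      have hmem : c ∈ ['A','E','I','O','U'] :=
        ((PySem.Chars.isIn_iff_infix _ _).mp htrue).sublist.subset (List.mem_singleton_self c)
      fin_cases hmem <;> simp_all [phonemeMapA, PySem.Dict.get?_mk_cons]
    simp [PySem.Dict.getD_eq_get?_getD, hget, h, hvow]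
  · simp [PySem.Dict.getD_eq_get?_getD, hget, h]

lemma contains_digraphs (k : List Char) :
    g2pDigraphsB.contains k = (vowelCombosA.get? k).isSome := by
  have e : g2pDigraphsB = vowelCombosA := rfl
  rw [e, PySem.Dict.contains_eq_isSome_get?]

lemma contains_single (c : Char) : g2pDigraphsB.contains [c] = false := by
  rw [contains_digraphs]
  simp [vowelCombosA, PySem.Dict.get?]

lemma getD_digraphs (c d : Char) (ps : List String)
    (h : vowelCombosA.get? [c, d] = some ps) : g2pDigraphsB.getD [c, d] [] = ps := by
  have e : g2pDigraphsB = vowelCombosA := rfl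
  rw [e]
  exact PySem.Dict.getD_of_get?_eq_some _ _ h

lemma getD_nil : g2pMapB.getD [] [] = [] := rfl

lemma fold_eq : ∀ (n : Nat) (t : List Char) (i : Nat) (out : List String), t.length - i ≤ n →
    ((∀ hi : i < t.length,
        flushB ((t.drop (i + 1)).foldl g2pStepB (out, [t[i]'hi])) = out ++ g2pLoopA t i)
     ∧ flushB ((t.drop i).foldl g2pStepB (out, [])) = out ++ g2pLoopA t i) := by
  intro n
  induction n with
  | zero =>
    intro t i out h
    have hle : t.length ≤ i := by omega
    refine ⟨fun hi => absurd hi (by omega), ?_⟩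
    rw [g2pLoopA, List.drop_eq_nil_of_le hle]
    simp [flushB, getD_nil, Nat.not_lt.mpr hle]
  | succ n ih =>
    intro t i out h
    have hC2 : ∀ hi : i < t.length,
        flushB ((t.drop (i + 1)).foldl g2pStepB (out, [t[i]'hi])) = out ++ g2pLoopA t i := by
      intro hi
      by_cases hi1 : i + 1 < t.length
      · -- at least one more character after t[i]
        have hdrop1 : t.drop (i + 1) = t[i + 1] :: t.drop (i + 2) :=
          List.drop_eq_getElem_cons hi1
        have h2 : i < t.length - 1 := by omega
        have hslice : PySem.List.slice t (some (i : Int)) (some ((i : Int) + 2)) =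
            [t[i], t[i + 1]] := by
          rw [show ((i : Int) + 2) = ((i : Int) + ((2 : Nat) : Int)) by norm_num,
            PySem.List.slice_natCast_add, List.drop_eq_getElem_cons hi, hdrop1]
          rfl
        rw [hdrop1, List.foldl_cons]
        rcases hv : vowelCombosA.get? [t[i], t[i + 1]] with _ | ps
        · -- no digraph: emit t[i]'s phonemes, t[i+1] becomes pending
          have hstep : g2pStepB (out, [t[i]]) t[i + 1] =
              (out ++ g2pMapB.getD [t[i]] [], [t[i + 1]]) := by
            simp [g2pStepB, contains_digraphs, hv]
          rw [hstep, (ih t (i + 1) (out ++ g2pMapB.getD [t[i]] []) (by omega)).1 hi1]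
          conv_rhs => rw [g2pLoopA]
          simp only [hi, dif_pos, if_pos h2, hslice, hv]
          rw [single_align, List.append_assoc]
        · -- digraph hit: emit it, pending becomes empty
          have hstep : g2pStepB (out, [t[i]]) t[i + 1] = (out ++ ps, []) := by
            simp [g2pStepB, contains_digraphs, hv, getD_digraphs _ _ _ hv]
          rw [hstep, (ih t (i + 2) (out ++ ps) (by omega)).2]
          conv_rhs => rw [g2pLoopA]
          simp only [hi, dif_pos, if_pos h2, hslice, hv]
          rw [List.append_assoc]
      · -- t[i] is the last character: the final flush emits its phonemes
        have hnil : t.drop (i + 1) = [] := List.drop_eq_nil_of_le (by omega)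
        rw [hnil, List.foldl_nil]
        rw [g2pLoopA]
        have h2 : ¬ i < t.length - 1 := by omega
        simp only [hi, dif_pos, if_neg h2]
        rw [g2pLoopA]
        simp only [Nat.not_lt.mpr (show t.length ≤ i + 1 by omega), dif_neg, not_false_iff,
          List.append_nil]
        rw [flushB, single_align]
    refine ⟨hC2, ?_⟩
    by_cases hi : i < t.length
    · have hdrop : t.drop i = t[i] :: t.drop (i + 1) := List.drop_eq_getElem_cons hi
      rw [hdrop, List.foldl_cons]
      have hstep : g2pStepB (out, []) t[i] = (out, [t[i]]) := by
        simp [g2pStepB, contains_single, getD_nil]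
      rw [hstep]
      exact hC2 hi
    · rw [g2pLoopA, List.drop_eq_nil_of_le (by omega), List.foldl_nil]
      simp [flushB, getD_nil, hi]

-- ===== VERDICT (by name: the statement is the Claim_ definition above) =====
theorem g2p_spec : Claim_equal_g2p := by
  intro text _
  unfold Spec_g2p g2p g2p_alt
  set t := PySem.Chars.strip (PySem.Chars.upper text.toList) with ht
  by_cases he : t.isEmpty
  · rw [if_pos he, List.isEmpty_iff.mp he]
    rfl
  · rw [if_neg he]
    have := (fold_eq t.length t 0 [] (by omega)).2
    simpa [flushB] using this.symm
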